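-- pv_equiv track=rewrite | github.com/HiteSit/HandsFreeDocking | HandsFreeDocking/tools/Fix_Mol2.py | find_best_atom_mapping
-- ===== SOURCE A (Python) =====
-- from typing import List, Optional, Tuple
--
-- def find_best_atom_mapping(sigs1: List, sigs2: List) -> Optional[List[int]]:
--     """
--     Find best mapping between two sets of connectivity signatures.
--     """
--     n = len(sigs1)
--     if n != len(sigs2):
--         return None
--
--     mapping = [None] * n
--     used = set()
--
--     # First pass: exact matches
--     for i, sig2 in enumerate(sigs2):
--         exact_matches = [j for j, sig1 in enumerate(sigs1)
--                         if sig1 == sig2 and j not in used]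
--         if len(exact_matches) == 1:
--             mapping[i] = exact_matches[0]
--             used.add(exact_matches[0])
--
--     # Second pass: match by element only
--     for i, sig2 in enumerate(sigs2):
--         if mapping[i] is None:
--             element = sig2[0]
--             candidates = [j for j, sig1 in enumerate(sigs1)
--                          if sig1[0] == element and j not in used]
--             if candidates:
--                 mapping[i] = candidates[0]
--                 used.add(candidates[0])
--
--     # Check completeness
--     if None in mapping:
--         return None
--
--     return mapping
-- ===== SOURCE B (Python) =====
-- def find_best_atom_mapping(sigs1, sigs2):
--     """
--     Find best mapping between two sets of connectivity signatures.
--     Single indexing pass: sigs1 grouped by signature tuple and by element,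
--     then each pass is a dict lookup instead of a scan over all of sigs1.
--     """
--     n = len(sigs1)
--     if n != len(sigs2):
--         return None
--
--     by_sig = {}
--     by_elem = {}
--     for j, s in enumerate(sigs1):
--         by_sig.setdefault(tuple(s), []).append(j)
--         by_elem.setdefault(s[0], []).append(j)
--
--     mapping = [None] * n
--
--     # First pass: exact matches (group holds exactly the unused exact candidates)
--     for i, s in enumerate(sigs2):
--         g = by_sig.get(tuple(s), [])
--         if len(g) == 1:
--             j = g.pop()
--             mapping[i] = j
--             by_elem[s[0]].remove(j)
--
--     # Second pass: match by element only (list holds the unused candidates, in order)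
--     for i, s in enumerate(sigs2):
--         if mapping[i] is None:
--             cands = by_elem.get(s[0], [])
--             if cands:
--                 mapping[i] = cands.pop(0)
--
--     if None in mapping:
--         return None
--     return mapping
-- ===== Notes on version B (the rewrite author's own statement) =====
-- stated objective: faster
-- what changed: B builds two hash indexes of sigs1 (by full signature tuple and by first element) in one pass and keeps them updated as indices are consumed, so each pass-1/pass-2 step is a dict lookup instead of A's full scan of sigs1 per element of sigs2.
-- outside the precondition, e.g. on find_best_atom_mapping([[]], [[]]): A returns [0], B raises IndexError
import Mathlib
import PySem

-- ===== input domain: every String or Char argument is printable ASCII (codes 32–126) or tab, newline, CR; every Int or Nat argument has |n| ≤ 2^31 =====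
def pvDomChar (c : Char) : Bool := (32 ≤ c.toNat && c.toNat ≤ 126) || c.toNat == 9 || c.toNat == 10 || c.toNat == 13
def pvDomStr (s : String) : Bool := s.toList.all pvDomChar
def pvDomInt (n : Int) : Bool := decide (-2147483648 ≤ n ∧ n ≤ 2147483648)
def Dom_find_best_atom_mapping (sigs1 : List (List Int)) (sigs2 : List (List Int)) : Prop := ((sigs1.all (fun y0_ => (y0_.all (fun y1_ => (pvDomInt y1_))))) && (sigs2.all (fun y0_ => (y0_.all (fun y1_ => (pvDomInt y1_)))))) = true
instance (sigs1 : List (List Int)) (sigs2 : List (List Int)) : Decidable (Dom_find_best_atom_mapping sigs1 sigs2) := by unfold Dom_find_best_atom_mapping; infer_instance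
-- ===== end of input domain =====

-- B replaces A's per-element full scans of sigs1 by two signature/element hash indexes built once
-- and updated incrementally (objective: faster). B (and hence this file's Pre_) indexes every
-- signature's first element up front, so empty signature lists are excluded.


-- ===== PORT A =====
-- loop body of A's first pass: exact_matches comprehension, then assign if unique
def stepA1 (sigs1 : List (List Int)) (st : List (Option Int) × PySem.Set Int) (p : Int × List Int) : List (Option Int) × PySem.Set Int :=
  let exact_matches := ((PySem.List.enumerate sigs1).filter
      (fun q => q.2 == p.2 && !(PySem.Set.contains st.2 q.1))).map (·.1)
  if exact_matches.length == 1 then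
    (st.1.set p.1.toNat (some (exact_matches.headD 0)), PySem.Set.add st.2 (exact_matches.headD 0))
  else st

-- loop body of A's second pass: element-only candidates, take the first
-- sig[0] is ported as PySem.List.pyGetD sig 0 0 — exact, since Pre_ gives sig ≠ []
def stepA2 (sigs1 : List (List Int)) (st : List (Option Int) × PySem.Set Int) (p : Int × List Int) : List (Option Int) × PySem.Set Int :=
  if st.1.getD p.1.toNat none = none then
    let element := PySem.List.pyGetD p.2 0 0
    let candidates := ((PySem.List.enumerate sigs1).filter
        (fun q => PySem.List.pyGetD q.2 0 0 == element && !(PySem.Set.contains st.2 q.1))).map (·.1)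
    match candidates with
    | [] => st
    | j :: _ => (st.1.set p.1.toNat (some j), PySem.Set.add st.2 j)
  else st

def find_best_atom_mapping (sigs1 : List (List Int)) (sigs2 : List (List Int)) : Option (List Int) :=
  if sigs1.length ≠ sigs2.length then none else
  let st1 := (PySem.List.enumerate sigs2).foldl (stepA1 sigs1)
      (List.replicate sigs1.length none, PySem.Set.empty)
  let st2 := (PySem.List.enumerate sigs2).foldl (stepA2 sigs1) st1
  if st2.1.contains none then none else some (st2.1.map (fun o => o.getD 0))

-- ===== PORT B =====
-- index-building loop body: by_sig.setdefault(tuple(s),[]).append(j); by_elem.setdefault(s[0],[]).append(j)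
def stepBIdx (d : PySem.Dict (List Int) (List Int) × PySem.Dict Int (List Int)) (p : Int × List Int) :
    PySem.Dict (List Int) (List Int) × PySem.Dict Int (List Int) :=
  (d.1.insert p.2 (d.1.getD p.2 [] ++ [p.1]),
   d.2.insert (PySem.List.pyGetD p.2 0 0) (d.2.getD (PySem.List.pyGetD p.2 0 0) [] ++ [p.1]))

-- B's first pass: group lookup; if the group is a singleton, assign it and remove it from both indexes
-- (.remove(j) never fails in Python since j is in the element group; .getD is only a totality guard)
def stepB1 (st : List (Option Int) × PySem.Dict (List Int) (List Int) × PySem.Dict Int (List Int))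
    (p : Int × List Int) : List (Option Int) × PySem.Dict (List Int) (List Int) × PySem.Dict Int (List Int) :=
  let g := st.2.1.getD p.2 []
  if g.length == 1 then
    let j := g.headD 0
    (st.1.set p.1.toNat (some j),
     st.2.1.insert p.2 [],
     st.2.2.insert (PySem.List.pyGetD p.2 0 0)
       ((PySem.List.remove? (st.2.2.getD (PySem.List.pyGetD p.2 0 0) []) j).getD
         (st.2.2.getD (PySem.List.pyGetD p.2 0 0) [])))
  else st

-- B's second pass: cands = by_elem.get(s[0], []); if cands: mapping[i] = cands.pop(0)
def stepB2 (st : List (Option Int) × PySem.Dict Int (List Int)) (p : Int × List Int) :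
    List (Option Int) × PySem.Dict Int (List Int) :=
  if st.1.getD p.1.toNat none = none then
    match st.2.getD (PySem.List.pyGetD p.2 0 0) [] with
    | [] => st
    | j :: rest => (st.1.set p.1.toNat (some j), st.2.insert (PySem.List.pyGetD p.2 0 0) rest)
  else st

def find_best_atom_mapping_alt (sigs1 : List (List Int)) (sigs2 : List (List Int)) : Option (List Int) :=
  if sigs1.length ≠ sigs2.length then none else
  let idx := (PySem.List.enumerate sigs1).foldl stepBIdx (PySem.Dict.empty, PySem.Dict.empty)
  let st1 := (PySem.List.enumerate sigs2).foldl stepB1 (List.replicate sigs1.length none, idx)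
  let st2 := (PySem.List.enumerate sigs2).foldl stepB2 (st1.1, st1.2.2)
  if st2.1.contains none then none else some (st2.1.map (fun o => o.getD 0))

-- ===== PRECONDITION & SPEC =====
-- Pre_ excludes inputs of equal length containing an empty signature list: there Python A either
-- raises IndexError on sig[0] or (when every empty signature is uniquely matched in pass 1)
-- returns while B raises IndexError building its element index.
def Pre_find_best_atom_mapping (sigs1 : List (List Int)) (sigs2 : List (List Int)) : Prop :=
  sigs1.length = sigs2.length → ((∀ s ∈ sigs1, s ≠ []) ∧ (∀ s ∈ sigs2, s ≠ []))
instance (sigs1 : List (List Int)) (sigs2 : List (List Int)) : Decidable (Pre_find_best_atom_mapping sigs1 sigs2) := by unfold Pre_find_best_atom_mapping; infer_instance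

def pvWitness_find_best_atom_mapping : List (List Int) × List (List Int) := ([[1], [2]], [[1], [3]])

def Spec_find_best_atom_mapping (sigs1 : List (List Int)) (sigs2 : List (List Int)) (out : Option (List Int)) : Prop := out = find_best_atom_mapping_alt sigs1 sigs2
instance (sigs1 : List (List Int)) (sigs2 : List (List Int)) (out : Option (List Int)) : Decidable (Spec_find_best_atom_mapping sigs1 sigs2 out) := by unfold Spec_find_best_atom_mapping; infer_instance

-- ===== CLAIM (what is proved, stated in full; the proofs are below) =====
def Claim_equal_find_best_atom_mapping : Prop := ∀ (sigs1 : List (List Int)) (sigs2 : List (List Int)), Dom_find_best_atom_mapping sigs1 sigs2 → Pre_find_best_atom_mapping sigs1 sigs2 → Spec_find_best_atom_mapping sigs1 sigs2 (find_best_atom_mapping sigs1 sigs2)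

-- ===== LEMMAS AND PROOFS =====

-- the unused candidates of sigs1 satisfying P, in index order (A's comprehension shape)
def pvCand (sigs1 : List (List Int)) (P : Int × List Int → Bool) (u : PySem.Set Int) : List Int :=
  ((PySem.List.enumerate sigs1).filter (fun q => P q && !(PySem.Set.contains u q.1))).map (·.1)

-- invariant linking A's (mapping, used) to B's (mapping, by_sig, by_elem) during pass 1
def Inv1 (sigs1 : List (List Int)) (a : List (Option Int) × PySem.Set Int)
    (b : List (Option Int) × PySem.Dict (List Int) (List Int) × PySem.Dict Int (List Int)) : Prop :=
  a.1 = b.1 ∧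
  (∀ s, b.2.1.getD s [] = pvCand sigs1 (fun q => q.2 == s) a.2) ∧
  (∀ e, b.2.2.getD e [] = pvCand sigs1 (fun q => PySem.List.pyGetD q.2 0 0 == e) a.2)

-- invariant for pass 2
def Inv2 (sigs1 : List (List Int)) (a : List (Option Int) × PySem.Set Int)
    (b : List (Option Int) × PySem.Dict Int (List Int)) : Prop :=
  a.1 = b.1 ∧
  (∀ e, b.2.getD e [] = pvCand sigs1 (fun q => PySem.List.pyGetD q.2 0 0 == e) a.2)

theorem enum_fst_inj {l : List (List Int)} {j : Int} {s t : List Int}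
    (h1 : (j, s) ∈ PySem.List.enumerate l) (h2 : (j, t) ∈ PySem.List.enumerate l) : s = t := by
  rw [PySem.List.mem_enumerate_iff] at h1 h2
  obtain ⟨k, hk, hks⟩ := h1
  obtain ⟨k', hk', hkt⟩ := h2
  have e1 := congrArg Prod.fst hks; have e2 := congrArg Prod.snd hks
  have e3 := congrArg Prod.fst hkt; have e4 := congrArg Prod.snd hkt
  simp at e1 e2 e3 e4
  have : k = k' := by omega
  subst this; rw [e2, e4]

theorem pvCand_nodup (sigs1 : List (List Int)) (P : Int × List Int → Bool) (u : PySem.Set Int) :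
    (pvCand sigs1 P u).Nodup := by
  unfold pvCand
  have h := (PySem.List.pairwise_lt_enumerate sigs1 0).sublist
      (List.filter_sublist (p := fun q => P q && !(PySem.Set.contains u q.1)))
  exact List.pairwise_map.mpr (h.imp (fun hlt => ne_of_lt hlt))

theorem mem_pvCand {sigs1 : List (List Int)} {P : Int × List Int → Bool} {u : PySem.Set Int} {j : Int} :
    j ∈ pvCand sigs1 P u ↔ ∃ t, (j, t) ∈ PySem.List.enumerate sigs1 ∧ P (j, t) = true ∧
      PySem.Set.contains u j = false := by
  unfold pvCand
  simp only [List.mem_map, List.mem_filter, Bool.and_eq_true, Bool.not_eq_true']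
  constructor
  · rintro ⟨⟨a, b⟩, ⟨hm, hP, hc⟩, rfl⟩; exact ⟨b, hm, hP, hc⟩
  · rintro ⟨t, hm, hP, hc⟩; exact ⟨(j, t), ⟨hm, hP, hc⟩, rfl⟩

theorem pvCand_add (sigs1 : List (List Int)) (P : Int × List Int → Bool) (u : PySem.Set Int) (j : Int)
    (hj : j ∉ u) : pvCand sigs1 P (PySem.Set.add u j) = (pvCand sigs1 P u).filter (· != j) := by
  unfold pvCand
  rw [List.filter_map, List.filter_filter]
  congr 1
  apply List.filter_congr
  intro q hq
  rw [PySem.Set.add_of_not_mem hj]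
  simp only [PySem.Set.contains, Function.comp]
  by_cases hqj : q.1 = j <;>
    cases hP : P q <;>
      simp [List.contains_eq_mem, hqj]

theorem stepA1_eq (sigs1 : List (List Int)) (a : List (Option Int) × PySem.Set Int) (p : Int × List Int) :
    stepA1 sigs1 a p =
      (if (pvCand sigs1 (fun q => q.2 == p.2) a.2).length == 1 then
        (a.1.set p.1.toNat (some ((pvCand sigs1 (fun q => q.2 == p.2) a.2).headD 0)),
         PySem.Set.add a.2 ((pvCand sigs1 (fun q => q.2 == p.2) a.2).headD 0))
      else a) := rfl

theorem step1_inv (sigs1 : List (List Int)) (a : List (Option Int) × PySem.Set Int)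
    (b : List (Option Int) × PySem.Dict (List Int) (List Int) × PySem.Dict Int (List Int))
    (p : Int × List Int) (h : Inv1 sigs1 a b) : Inv1 sigs1 (stepA1 sigs1 a p) (stepB1 b p) := by
  obtain ⟨hm, hS, hE⟩ := h
  rw [stepA1_eq]
  unfold stepB1
  simp only [hS p.2]
  split_ifs with hlen
  case neg => exact ⟨hm, hS, hE⟩
  case pos =>
    set em := pvCand sigs1 (fun q => q.2 == p.2) a.2 with hem
    obtain ⟨j, hj⟩ : ∃ j, em = [j] := List.length_eq_one_iff.mp (by simpa using hlen)
    have hjmem : j ∈ em := by rw [hj]; exact List.mem_singleton_self j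
    obtain ⟨t, htmem, htP, hcont⟩ := mem_pvCand.mp hjmem
    have ht : t = p.2 := by simpa using htP
    subst ht
    have hju : j ∉ a.2 := by
      simpa [PySem.Set.contains, List.contains_eq_mem] using hcont
    have hhead : em.headD 0 = j := by rw [hj]; rfl
    rw [hhead]
    refine ⟨by rw [hm], ?_, ?_⟩
    · intro s
      by_cases hs : s = p.2
      · subst hs
        rw [PySem.Dict.getD_insert_self, pvCand_add sigs1 _ a.2 j hju, ← hem, hj]
        simp
      · rw [PySem.Dict.getD_insert_of_ne _ _ _ hs, hS s,
          pvCand_add sigs1 _ a.2 j hju]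
        rw [List.filter_eq_self.mpr]
        intro x hx
        obtain ⟨t', ht'mem, ht'P, _⟩ := mem_pvCand.mp hx
        have hxne : x ≠ j := by
          intro hxj; subst hxj
          have := enum_fst_inj ht'mem htmem
          subst this
          exact hs (beq_iff_eq.mp ht'P).symm
        simpa using hxne
    · intro e
      by_cases he : e = PySem.List.pyGetD p.2 0 0
      · subst he
        rw [PySem.Dict.getD_insert_self, hE _,
          pvCand_add sigs1 _ a.2 j hju]
        have hjmem2 : j ∈ pvCand sigs1 (fun q => PySem.List.pyGetD q.2 0 0 == PySem.List.pyGetD p.2 0 0) a.2 :=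
          mem_pvCand.mpr ⟨p.2, htmem, by simp, hcont⟩
        rw [PySem.List.remove?_eq_some_erase _ j hjmem2, Option.getD_some,
          (pvCand_nodup sigs1 _ a.2).erase_eq_filter j]
      · rw [PySem.Dict.getD_insert_of_ne _ _ _ he, hE e,
          pvCand_add sigs1 _ a.2 j hju]
        rw [List.filter_eq_self.mpr]
        intro x hx
        obtain ⟨t', ht'mem, ht'P, _⟩ := mem_pvCand.mp hx
        have hxne : x ≠ j := by
          intro hxj; subst hxj
          have := enum_fst_inj ht'mem htmem
          subst this
          exact he (beq_iff_eq.mp ht'P).symm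
        simpa using hxne

theorem stepA2_eq (sigs1 : List (List Int)) (a : List (Option Int) × PySem.Set Int) (p : Int × List Int) :
    stepA2 sigs1 a p =
      (if a.1.getD p.1.toNat none = none then
        match pvCand sigs1 (fun q => PySem.List.pyGetD q.2 0 0 == PySem.List.pyGetD p.2 0 0) a.2 with
        | [] => a
        | j :: _ => (a.1.set p.1.toNat (some j), PySem.Set.add a.2 j)
      else a) := rfl

theorem step2_inv (sigs1 : List (List Int)) (a : List (Option Int) × PySem.Set Int)
    (b : List (Option Int) × PySem.Dict Int (List Int))
    (p : Int × List Int) (h : Inv2 sigs1 a b) : Inv2 sigs1 (stepA2 sigs1 a p) (stepB2 b p) := by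
  obtain ⟨hm, hE⟩ := h
  rw [stepA2_eq]
  unfold stepB2
  simp only [← hm, hE]
  split_ifs with hcond
  case neg => exact ⟨hm, hE⟩
  case pos =>
    rcases hc : pvCand sigs1 (fun q => PySem.List.pyGetD q.2 0 0 == PySem.List.pyGetD p.2 0 0) a.2
      with _ | ⟨j, rest⟩
    · exact ⟨hm, hE⟩
    · show Inv2 sigs1 (a.1.set p.1.toNat (some j), a.2.add j)
        (a.1.set p.1.toNat (some j), b.2.insert (PySem.List.pyGetD p.2 0 0) rest)
      have hjmem : j ∈ pvCand sigs1
          (fun q => PySem.List.pyGetD q.2 0 0 == PySem.List.pyGetD p.2 0 0) a.2 := by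
        rw [hc]; exact List.mem_cons_self
      obtain ⟨t, htmem, htP, hcont⟩ := mem_pvCand.mp hjmem
      have hju : j ∉ a.2 := by
        simpa [PySem.Set.contains, List.contains_eq_mem] using hcont
      refine ⟨by rw [hm], ?_⟩
      intro e
      by_cases he : e = PySem.List.pyGetD p.2 0 0
      · subst he
        rw [PySem.Dict.getD_insert_self, pvCand_add sigs1 _ a.2 j hju, hc]
        have hnd := pvCand_nodup sigs1
          (fun q => PySem.List.pyGetD q.2 0 0 == PySem.List.pyGetD p.2 0 0) a.2
        rw [hc] at hnd
        have hjr : j ∉ rest := (List.nodup_cons.mp hnd).1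
        rw [List.filter_cons]
        simp only [bne_self_eq_false, Bool.false_eq_true, ite_false]
        rw [List.filter_eq_self.mpr]
        intro x hx
        have : x ≠ j := fun hxj => hjr (hxj ▸ hx)
        simpa using this
      · rw [PySem.Dict.getD_insert_of_ne _ _ _ he, hE e, pvCand_add sigs1 _ a.2 j hju]
        rw [List.filter_eq_self.mpr]
        intro x hx
        obtain ⟨t', ht'mem, ht'P, _⟩ := mem_pvCand.mp hx
        have hxne : x ≠ j := by
          intro hxj; subst hxj
          have := enum_fst_inj ht'mem htmem
          subst this
          exact he ((beq_iff_eq.mp ht'P).symm.trans (beq_iff_eq.mp htP))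
        simpa using hxne

theorem pass1_inv (sigs1 : List (List Int)) (l : List (Int × List Int)) :
    ∀ a b, Inv1 sigs1 a b → Inv1 sigs1 (l.foldl (stepA1 sigs1) a) (l.foldl stepB1 b) := by
  induction l with
  | nil => exact fun a b h => h
  | cons p l ih => exact fun a b h => ih _ _ (step1_inv sigs1 a b p h)

theorem pass2_inv (sigs1 : List (List Int)) (l : List (Int × List Int)) :
    ∀ a b, Inv2 sigs1 a b → Inv2 sigs1 (l.foldl (stepA2 sigs1) a) (l.foldl stepB2 b) := by
  induction l with
  | nil => exact fun a b h => h
  | cons p l ih => exact fun a b h => ih _ _ (step2_inv sigs1 a b p h)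

theorem build_idx (s : List Int) (e : Int) (l : List (Int × List Int)) :
    ∀ d : PySem.Dict (List Int) (List Int) × PySem.Dict Int (List Int),
      ((l.foldl stepBIdx d).1.getD s [] = d.1.getD s [] ++ (l.filter (fun q => q.2 == s)).map (·.1)) ∧
      ((l.foldl stepBIdx d).2.getD e [] = d.2.getD e [] ++ (l.filter (fun q => PySem.List.pyGetD q.2 0 0 == e)).map (·.1)) := by
  induction l with
  | nil => intro d; simp
  | cons p l ih =>
    intro d
    rw [List.foldl_cons]
    obtain ⟨ih1, ih2⟩ := ih (stepBIdx d p)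
    refine ⟨?_, ?_⟩
    · rw [ih1]
      by_cases hs : s = p.2
      · subst hs
        simp [stepBIdx, PySem.Dict.getD_insert_self]
      · have hb : (p.2 == s) = false := by
          simp only [beq_eq_false_iff_ne]; exact fun h => hs h.symm
        simp [stepBIdx, PySem.Dict.getD_insert_of_ne _ _ _ hs, hb]
    · rw [ih2]
      by_cases he : e = PySem.List.pyGetD p.2 0 0
      · subst he
        simp [stepBIdx, PySem.Dict.getD_insert_self]
      · have hb : (PySem.List.pyGetD p.2 0 0 == e) = false := by
          simp only [beq_eq_false_iff_ne]; exact fun h => he h.symm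
        simp [stepBIdx, PySem.Dict.getD_insert_of_ne _ _ _ he, hb]

theorem pvCand_empty (sigs1 : List (List Int)) (P : Int × List Int → Bool) :
    pvCand sigs1 P PySem.Set.empty = ((PySem.List.enumerate sigs1).filter P).map (·.1) := by
  unfold pvCand
  congr 1
  apply List.filter_congr
  intro q _
  simp [PySem.Set.contains, PySem.Set.empty]

theorem base_inv (sigs1 : List (List Int)) (m : List (Option Int)) :
    Inv1 sigs1 (m, PySem.Set.empty)
      (m,
        (PySem.List.enumerate sigs1).foldl stepBIdx (PySem.Dict.empty, PySem.Dict.empty)) := by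
  refine ⟨rfl, ?_, ?_⟩
  · intro s
    rw [(build_idx s 0 (PySem.List.enumerate sigs1) (PySem.Dict.empty, PySem.Dict.empty)).1,
      pvCand_empty]
    simp [PySem.Dict.getD, PySem.Dict.get?, PySem.Dict.empty]
  · intro e
    rw [(build_idx [] e (PySem.List.enumerate sigs1) (PySem.Dict.empty, PySem.Dict.empty)).2,
      pvCand_empty]
    simp [PySem.Dict.getD, PySem.Dict.get?, PySem.Dict.empty]

-- ===== VERDICT (by name: the statement is the Claim_ definition above) =====
theorem find_best_atom_mapping_spec : Claim_equal_find_best_atom_mapping := by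
  unfold Claim_equal_find_best_atom_mapping
  intro sigs1 sigs2 _ _
  unfold Spec_find_best_atom_mapping find_best_atom_mapping find_best_atom_mapping_alt
  by_cases hlen : sigs1.length = sigs2.length
  · simp only [hlen, ne_eq, not_true_eq_false, if_false]
    have h1 := pass1_inv sigs1 (PySem.List.enumerate sigs2) _ _ (base_inv sigs1 (List.replicate sigs2.length none))
    have h2 : Inv2 sigs1
        (List.foldl (stepA1 sigs1) (List.replicate sigs2.length none, PySem.Set.empty)
          (PySem.List.enumerate sigs2))
        ((List.foldl stepB1
            (List.replicate sigs2.length none,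
              List.foldl stepBIdx (PySem.Dict.empty, PySem.Dict.empty) (PySem.List.enumerate sigs1))
            (PySem.List.enumerate sigs2)).1,
         (List.foldl stepB1
            (List.replicate sigs2.length none,
              List.foldl stepBIdx (PySem.Dict.empty, PySem.Dict.empty) (PySem.List.enumerate sigs1))
            (PySem.List.enumerate sigs2)).2.2) := ⟨h1.1, h1.2.2⟩
    have h3 := pass2_inv sigs1 (PySem.List.enumerate sigs2) _ _ h2
    rw [h3.1]
  · simp only [hlen, ne_eq, ite_true, not_false_iff]
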